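-- pv_equiv track=rewrite | github.com/MarRV17/tutoria2 | laboratorioEjercicio4.py | transformar_lista_palabras
-- ===== SOURCE A (Python) =====
-- def transformar_lista_palabras(lista_de_datos, opcion):
--
--     ## Ejercicio 4:
--     ## Crear una función que reciba una lista de palabras y un número.
--     ## La función debe transformar cada palabra de la lista según la opción seleccionada (1, 2 o 3).
--
--     lista_transformada = []
--
--     for palabra in lista_de_datos:
--
--         if opcion == 1:
--             resultado = palabra.upper()
--
--         elif opcion == 2:
--             resultado = palabra.lower()
--
--         elif opcion == 3:
--             resultado = palabra.capitalize()  # Primera letra en mayúscula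
--
--         else:
--             resultado = "Opción Inválida"
--
--         lista_transformada.append(resultado)
--
--     return lista_transformada
-- ===== SOURCE B (Python) =====
-- def transformar_lista_palabras(lista_de_datos, opcion):
--     # Character-level rewrite: instead of calling per-word string methods,
--     # build every output word character by character with a first-char flag;
--     # the three valid options collapse into one per-character case rule.
--     if opcion != 1 and opcion != 2 and opcion != 3:
--         return ["Opción Inválida" for _ in lista_de_datos]
--
--     def transforma(palabra):
--         chars = []
--         primera = True
--         for c in palabra:
--             if opcion == 2 or (opcion == 3 and not primera):
--                 chars.append(c.lower())
--             else:
--                 chars.append(c.upper())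
--             primera = False
--         return ''.join(chars)
--
--     return [transforma(p) for p in lista_de_datos]
-- ===== Notes on version B (the rewrite author's own statement) =====
-- stated objective: alternative
-- what changed: B validates the option once, then builds each output word character by character with a first-character flag, one per-character case rule covering all three valid options, instead of A's per-word dispatch to str.upper/lower/capitalize inside the loop.
import Mathlib
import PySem

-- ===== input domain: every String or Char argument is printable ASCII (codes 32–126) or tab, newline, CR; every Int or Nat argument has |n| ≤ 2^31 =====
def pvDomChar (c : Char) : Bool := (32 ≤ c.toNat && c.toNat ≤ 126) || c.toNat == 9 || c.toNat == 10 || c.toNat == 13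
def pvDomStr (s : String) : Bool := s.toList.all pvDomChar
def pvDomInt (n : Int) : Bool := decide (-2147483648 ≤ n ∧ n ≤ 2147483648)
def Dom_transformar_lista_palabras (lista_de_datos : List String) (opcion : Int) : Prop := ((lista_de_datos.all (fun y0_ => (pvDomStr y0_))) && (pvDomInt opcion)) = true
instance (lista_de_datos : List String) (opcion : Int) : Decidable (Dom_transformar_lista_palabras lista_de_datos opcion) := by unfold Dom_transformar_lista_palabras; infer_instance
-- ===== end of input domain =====

-- B validates the option once, then rebuilds each word character by character with a
-- first-char flag (one per-character case rule), instead of A's per-word method dispatch.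

-- str.capitalize on the ASCII domain: first char uppercased, rest lowercased (exact there).
def pyCapitalize (s : String) : String :=
  match s.toList with
  | [] => s
  | c :: rest => String.ofList (PySem.Chars.upperChar c :: PySem.Chars.lower rest)

-- ===== PORT A =====
def transformar_lista_palabras (lista_de_datos : List String) (opcion : Int) : List String :=
  lista_de_datos.foldl
    (fun lista_transformada palabra =>
      let resultado :=
        if opcion = 1 then PySem.Str.upper palabra
        else if opcion = 2 then PySem.Str.lower palabra
        else if opcion = 3 then pyCapitalize palabra
        else "Opción Inválida"
      lista_transformada ++ [resultado])
    []

-- ===== PORT B =====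
-- inner helper 'transforma' of Source B: char-by-char loop with state (chars, primera)
def pvTransforma (opcion : Int) (palabra : String) : String :=
  String.ofList
    ((palabra.toList.foldl
        (fun (st : List Char × Bool) c =>
          (st.1 ++ [if opcion = 2 ∨ (opcion = 3 ∧ ¬ st.2 = true) then PySem.Chars.lowerChar c
                    else PySem.Chars.upperChar c], false))
        ([], true)).1)

def transformar_lista_palabras_alt (lista_de_datos : List String) (opcion : Int) : List String :=
  if opcion ≠ 1 ∧ opcion ≠ 2 ∧ opcion ≠ 3 then
    lista_de_datos.map (fun _ => "Opción Inválida")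
  else
    lista_de_datos.map (pvTransforma opcion)

-- ===== PRECONDITION & SPEC =====
def Spec_transformar_lista_palabras (lista_de_datos : List String) (opcion : Int) (out : List String) : Prop := out = transformar_lista_palabras_alt lista_de_datos opcion
instance (lista_de_datos : List String) (opcion : Int) (out : List String) : Decidable (Spec_transformar_lista_palabras lista_de_datos opcion out) := by unfold Spec_transformar_lista_palabras; infer_instance

-- ===== CLAIM =====
def Claim_equal_transformar_lista_palabras : Prop := ∀ (lista_de_datos : List String) (opcion : Int), Dom_transformar_lista_palabras lista_de_datos opcion → Spec_transformar_lista_palabras lista_de_datos opcion (transformar_lista_palabras lista_de_datos opcion)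

-- ===== LEMMAS AND PROOFS =====

theorem foldl_append_map {α β : Type} (f : α → β) (l : List α) (acc : List β) :
    l.foldl (fun a x => a ++ [f x]) acc = acc ++ l.map f := by
  induction l generalizing acc with
  | nil => simp
  | cons x xs ih => simp [List.foldl, ih]

theorem transformar_A_eq_map (lista_de_datos : List String) (opcion : Int) :
    transformar_lista_palabras lista_de_datos opcion =
      lista_de_datos.map (fun palabra =>
        if opcion = 1 then PySem.Str.upper palabra
        else if opcion = 2 then PySem.Str.lower palabra
        else if opcion = 3 then pyCapitalize palabra
        else "Opción Inválida") := by
  unfold transformar_lista_palabras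
  simpa using foldl_append_map _ lista_de_datos []

-- the char loop when the rule ignores the flag (options 1 and 2)
theorem pvLoop_const (f : Char → Char) (l : List Char) (acc : List Char) (b : Bool) :
    (l.foldl (fun (st : List Char × Bool) c => (st.1 ++ [f c], false)) (acc, b)).1
      = acc ++ l.map f := by
  induction l generalizing acc b with
  | nil => simp
  | cons x xs ih => simp [List.foldl, ih]

-- the char loop for option 3, once past the first character (primera = false)
theorem pvLoop_cap (l : List Char) (acc : List Char) :
    (l.foldl
        (fun (st : List Char × Bool) c =>
          (st.1 ++ [if st.2 = false then PySem.Chars.lowerChar c else PySem.Chars.upperChar c], false))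
        (acc, false)).1
      = acc ++ l.map PySem.Chars.lowerChar := by
  induction l generalizing acc with
  | nil => simp
  | cons x xs ih => simp [List.foldl, ih]

theorem pvTransforma_one (palabra : String) :
    pvTransforma 1 palabra = PySem.Str.upper palabra := by
  unfold pvTransforma
  apply String.toList_inj.mp
  simp [pvLoop_const, PySem.Chars.upper]

theorem pvTransforma_two (palabra : String) :
    pvTransforma 2 palabra = PySem.Str.lower palabra := by
  unfold pvTransforma
  apply String.toList_inj.mp
  simp [pvLoop_const, PySem.Chars.lower]

theorem pvTransforma_three (palabra : String) :
    pvTransforma 3 palabra = pyCapitalize palabra := by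
  unfold pvTransforma pyCapitalize
  cases h : palabra.toList with
  | nil =>
    apply String.toList_inj.mp
    simp [h]
  | cons c rest =>
    apply String.toList_inj.mp
    simp [List.foldl, pvLoop_cap, PySem.Chars.lower]

-- ===== VERDICT =====
theorem transformar_lista_palabras_spec : Claim_equal_transformar_lista_palabras := by
  intro lista_de_datos opcion _
  unfold Spec_transformar_lista_palabras transformar_lista_palabras_alt
  rw [transformar_A_eq_map]
  by_cases h1 : opcion = 1
  · simp [h1, pvTransforma_one]
  · by_cases h2 : opcion = 2
    · simp [h2, pvTransforma_two]
    · by_cases h3 : opcion = 3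
      · simp [h3, pvTransforma_three]
      · simp [h1, h2, h3]
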